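-- pv_equiv track=rewrite | github.com/TristaCao/cmsc701_term_project | huffman.py | indicies_to_code
-- ===== SOURCE A (Python) =====
-- def indicies_to_code(path, digits, tagged):
--     """Convert the path into a string.
--
--      We join the indices directly, from most to least significant, keeping
--      leading zeroes.
--      Examples:
--        [1, 2, 3] -> "123"
--        [7, 2, 10] -> "72a"
--        [0, 2, 1] ->  "021"
--     """
--     combination = ""
--     for index in path:
--         if index < 0:
--             raise ValueError("cannot accept negative path indices (what went wrong?)")
--         if index >= digits:
--             raise ValueError("cannot have an index greater than the number of digits!")
--
--         combination += baseN(index, digits, tagged)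
--
--     return combination
--
-- def baseN(n,b, tagged):
--
--     if n == 0:
--         return chr(0)
--     digits = []
--     while n:
--         digits.append(int(n % b))
--         n //= b
--     list =  digits[::-1]
--     text_code = ''
--
--     if tagged == True:
--         text_code += chr(2**7 + list[0])
--     else:
--         text_code += chr(list[0])
--
--
--     for num in list[1:]:
--         text_code += chr(num)
--     return text_code
-- ===== SOURCE B (Python) =====
-- def indicies_to_code(path, digits, tagged):
--     """Same conversion, one flat pass: each in-range index is a single 'digit',
--     so no base-conversion loop is needed; index 0 always maps to chr(0)."""
--     chars = []
--     for index in path: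
--         if index < 0:
--             raise ValueError("cannot accept negative path indices (what went wrong?)")
--         if index >= digits:
--             raise ValueError("cannot have an index greater than the number of digits!")
--         if index == 0:
--             chars.append(chr(0))
--         elif tagged:
--             chars.append(chr(128 + index))
--         else:
--             chars.append(chr(index))
--     return ''.join(chars)
-- ===== Notes on version B (the rewrite author's own statement) =====
-- stated objective: simpler
-- what changed: B drops the baseN helper entirely (no while loop, no digit list, no reversal, no string concatenation): since every accepted index is < digits, each index is exactly one character, so B maps each index directly to its character and joins a list once. Pre_ excludes only inputs where Python raises (guard ValueErrors, chr out of range) plus the surrogate codepoints 0xD800-0xDFFF, whose returned one-char string is not representable as a Lean String.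
import Mathlib
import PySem

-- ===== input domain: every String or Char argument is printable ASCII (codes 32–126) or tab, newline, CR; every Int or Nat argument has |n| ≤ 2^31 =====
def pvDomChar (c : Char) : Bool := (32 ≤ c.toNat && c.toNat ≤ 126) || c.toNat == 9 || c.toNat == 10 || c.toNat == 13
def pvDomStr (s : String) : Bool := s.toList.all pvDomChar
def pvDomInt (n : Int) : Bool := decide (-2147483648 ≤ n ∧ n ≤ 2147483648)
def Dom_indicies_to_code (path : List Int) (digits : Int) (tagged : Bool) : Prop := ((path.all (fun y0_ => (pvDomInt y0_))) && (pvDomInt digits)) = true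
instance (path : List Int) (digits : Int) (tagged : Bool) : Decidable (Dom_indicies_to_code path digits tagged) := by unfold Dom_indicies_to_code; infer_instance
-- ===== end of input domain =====

-- B inlines baseN into one map over path (since every accepted index is < digits it is a single
-- character); objective: simpler. Equality of return values is proved on Pre_ below.


-- ===== PORT A =====
-- the 'while n:' loop of baseN: append n % b, then n //= b; fuel (n.natAbs + 1) bounds the
-- iteration count on every input reached under Pre_ (there n < b with 0 < b, so one step suffices)
def pvBaseNLoop (fuel : Nat) (n b : Int) (acc : List Int) : List Int :=
  match fuel with
  | 0 => acc
  | fuel + 1 =>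
    if n ≠ 0 then pvBaseNLoop fuel (PySem.Int.floordiv n b) b (acc ++ [PySem.Int.mod n b])
    else acc

-- baseN(n, b, tagged), built over List Char (chr(k) → Char.ofNat k.toNat, exact for the valid
-- codepoints Pre_ admits; list[0] → headD 0, exact since digits ≠ [] when n ≠ 0)
def pvBaseN (n b : Int) (tagged : Bool) : List Char :=
  if n = 0 then [Char.ofNat 0]
  else
    let digits := pvBaseNLoop (n.natAbs + 1) n b []
    let l := digits.reverse
    let first := if tagged = true then Char.ofNat (2 ^ 7 + l.headD 0).toNat
                 else Char.ofNat (l.headD 0).toNat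
    first :: l.tail.map (fun num => Char.ofNat num.toNat)

-- the for-loop of A; the two ValueError guards (index < 0, index >= digits) raise and are
-- exactly the inputs Pre_ excludes
def indicies_to_code (path : List Int) (digits : Int) (tagged : Bool) : String :=
  String.ofList (path.foldl (fun combination index => combination ++ pvBaseN index digits tagged) [])

-- ===== PORT B =====
def indicies_to_code_alt (path : List Int) (digits : Int) (tagged : Bool) : String :=
  String.ofList (path.map (fun index =>
    if index = 0 then Char.ofNat 0
    else if tagged then Char.ofNat (128 + index).toNat
    else Char.ofNat index.toNat))

-- ===== PRECONDITION & SPEC =====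
-- Pre_ excludes (a) the guard raises index < 0 / index ≥ digits, (b) indices whose codepoint is
-- ≥ 0x110000 (chr raises ValueError), and (c) indices whose codepoint is a surrogate
-- (0xD800–0xDFFF): there Python A returns a one-char surrogate string that is not a value of
-- Lean's String/Char type, so it cannot be ported; B returns the same string there.
def Pre_indicies_to_code (path : List Int) (digits : Int) (tagged : Bool) : Prop :=
  ∀ index ∈ path, 0 ≤ index ∧ index < digits ∧
    ((if tagged ∧ index ≠ 0 then 128 + index else index) < 1114112 ∧
     ((if tagged ∧ index ≠ 0 then 128 + index else index) < 55296 ∨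
      57344 ≤ (if tagged ∧ index ≠ 0 then 128 + index else index)))
instance (path : List Int) (digits : Int) (tagged : Bool) : Decidable (Pre_indicies_to_code path digits tagged) := by unfold Pre_indicies_to_code; infer_instance

def pvWitness_indicies_to_code : List Int × Int × Bool := ([0, 2, 1], 3, true)

def Spec_indicies_to_code (path : List Int) (digits : Int) (tagged : Bool) (out : String) : Prop := out = indicies_to_code_alt path digits tagged
instance (path : List Int) (digits : Int) (tagged : Bool) (out : String) : Decidable (Spec_indicies_to_code path digits tagged out) := by unfold Spec_indicies_to_code; infer_instance

-- ===== CLAIM (what is proved, stated in full; the proofs are below) =====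
def Claim_equal_indicies_to_code : Prop := ∀ (path : List Int) (digits : Int) (tagged : Bool), Dom_indicies_to_code path digits tagged → Pre_indicies_to_code path digits tagged → Spec_indicies_to_code path digits tagged (indicies_to_code path digits tagged)

-- ===== LEMMAS AND PROOFS =====

-- under the guards, baseN produces exactly the single character B maps the index to
theorem pvBaseN_single (i b : Int) (tagged : Bool) (h0 : 0 ≤ i) (hb : i < b) :
    pvBaseN i b tagged =
      [if i = 0 then Char.ofNat 0
       else if tagged then Char.ofNat (128 + i).toNat else Char.ofNat i.toNat] := by
  by_cases hi : i = 0
  · simp [pvBaseN, hi]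
  · have hbpos : 0 < b := lt_of_le_of_lt h0 hb
    have hipos : 0 < i := lt_of_le_of_ne h0 (Ne.symm hi)
    have hm : PySem.Int.mod i b = i := by
      rw [PySem.Int.mod_eq_emod_of_pos hbpos]; exact Int.emod_eq_of_lt h0 hb
    have hd : PySem.Int.floordiv i b = 0 := by
      rw [PySem.Int.floordiv_eq_ediv_of_pos hbpos]; exact Int.ediv_eq_zero_of_lt h0 hb
    have hfuel : i.natAbs + 1 = (i.natAbs - 1) + 1 + 1 := by omega
    have hstop : pvBaseNLoop i.natAbs 0 b [i] = [i] := by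
      cases i.natAbs <;> simp [pvBaseNLoop]
    simp only [pvBaseN, hi, hfuel, pvBaseNLoop, hm, hd]
    cases tagged <;> simp [hstop, hi]

theorem pv_fold_eq_map (digits : Int) (tagged : Bool) (path : List Int)
    (h : ∀ index ∈ path, 0 ≤ index ∧ index < digits) (acc : List Char) :
    path.foldl (fun combination index => combination ++ pvBaseN index digits tagged) acc =
      acc ++ path.map (fun index =>
        if index = 0 then Char.ofNat 0
        else if tagged then Char.ofNat (128 + index).toNat else Char.ofNat index.toNat) := by
  induction path generalizing acc with
  | nil => simp
  | cons x xs ih =>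
    have hx := h x (by simp)
    simp only [List.foldl_cons, List.map_cons]
    rw [ih (fun i hi => h i (by simp [hi])),
        pvBaseN_single x digits tagged hx.1 hx.2]
    simp

-- ===== VERDICT (by name: the statement is the Claim_ definition above) =====
theorem indicies_to_code_spec : Claim_equal_indicies_to_code := by
  intro path digits tagged _ hpre
  unfold Spec_indicies_to_code indicies_to_code indicies_to_code_alt
  rw [pv_fold_eq_map digits tagged path (fun i hi => ⟨(hpre i hi).1, (hpre i hi).2.1⟩) []]
  simp
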